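-- pv_equiv track=rewrite | github.com/alexdxy/alexddx | ep2.py | pdj
-- ===== SOURCE A (Python) =====
-- op1=[[1,2,3],
-- 	 [4,5,6],
-- 	 [7,8,0]
-- ]
--
-- op2=[[1,2,3],
-- 	 [8,0,4],
-- 	 [7,6,5]
-- ]
--
-- def pdj(ip):
-- 	ct=0
-- 	for i in range(9):
-- 		for j in range(i):
-- 			if ip[i]<ip[j]:
-- 				ct=ct+1
-- 	if ct%2==0:
-- 		return op1
-- 	else:
-- 		return op2
-- ===== SOURCE B (Python) =====
-- op1=[[1,2,3],
-- 	 [4,5,6],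
-- 	 [7,8,0]
-- ]
--
-- op2=[[1,2,3],
-- 	 [8,0,4],
-- 	 [7,6,5]
-- ]
--
-- def _sort_count(a):
-- 	# merge sort returning (sorted list, number of inversions), strict '<' so ties count nothing
-- 	if len(a) <= 1:
-- 		return a, 0
-- 	mid = len(a) // 2
-- 	left, cl = _sort_count(a[:mid])
-- 	right, cr = _sort_count(a[mid:])
-- 	merged = []
-- 	cross = 0
-- 	i = j = 0
-- 	while i < len(left) and j < len(right):
-- 		if right[j] < left[i]:
-- 			cross += len(left) - i
-- 			merged.append(right[j])
-- 			j += 1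
-- 		else:
-- 			merged.append(left[i])
-- 			i += 1
-- 	merged.extend(left[i:])
-- 	merged.extend(right[j:])
-- 	return merged, cl + cr + cross
--
-- def pdj(ip):
-- 	vals = [ip[i] for i in range(9)]
-- 	inv = _sort_count(vals)[1]
-- 	return op1 if inv % 2 == 0 else op2
-- ===== Notes on version B (the rewrite author's own statement) =====
-- stated objective: alternative
-- what changed: B replaces A's quadratic double loop over index pairs with a recursive merge sort that counts inversions during the merge (strict '<', so ties count nothing) and returns op1/op2 by the parity of that count.
import Mathlib
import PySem

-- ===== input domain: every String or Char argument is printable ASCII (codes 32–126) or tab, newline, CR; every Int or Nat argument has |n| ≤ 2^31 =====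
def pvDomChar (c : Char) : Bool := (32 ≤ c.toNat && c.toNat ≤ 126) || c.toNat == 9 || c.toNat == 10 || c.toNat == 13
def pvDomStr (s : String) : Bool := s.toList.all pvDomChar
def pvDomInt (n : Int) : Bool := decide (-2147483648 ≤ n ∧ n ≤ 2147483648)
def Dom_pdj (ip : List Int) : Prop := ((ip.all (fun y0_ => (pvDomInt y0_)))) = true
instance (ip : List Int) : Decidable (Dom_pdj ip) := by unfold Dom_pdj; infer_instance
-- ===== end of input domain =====

-- B replaces A's quadratic pair scan with a merge sort counting inversions during the merge; same result, no speed claim (fixed 9-element input).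

-- ===== PORT A =====
def pdjOp1 : List (List Int) := [[1,2,3],[4,5,6],[7,8,0]]
def pdjOp2 : List (List Int) := [[1,2,3],[8,0,4],[7,6,5]]

def pdj (ip : List Int) : List (List Int) :=
  let ct : Int :=
    (PySem.List.pyRange 0 9 1).foldl (fun ct i =>
      (PySem.List.pyRange 0 i 1).foldl (fun ct j =>
        if PySem.List.pyGetD ip i 0 < PySem.List.pyGetD ip j 0 then ct + 1 else ct) ct) 0
  if PySem.Int.mod ct 2 == 0 then pdjOp1 else pdjOp2

-- ===== PORT B =====
-- the merge while-loop of Source B, as recursion on the two remaining suffixes;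
-- 'len(left) - i' is the length of the remaining left suffix
def pdjMerge : List Int → List Int → List Int × Int
  | [], r => (r, 0)
  | x :: l, [] => (x :: l, 0)
  | x :: l, y :: r =>
    if y < x then
      let p := pdjMerge (x :: l) r
      (y :: p.1, p.2 + ((l.length : Int) + 1))
    else
      let p := pdjMerge l (y :: r)
      (x :: p.1, p.2)
termination_by l r => l.length + r.length

-- _sort_count of Source B
def pdjSortCount (a : List Int) : List Int × Int :=
  if _h : a.length ≤ 1 then (a, 0)
  else
    let mid := a.length / 2
    let pl := pdjSortCount (a.take mid)
    let pr := pdjSortCount (a.drop mid)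
    let pm := pdjMerge pl.1 pr.1
    (pm.1, pl.2 + pr.2 + pm.2)
termination_by a.length
decreasing_by
  · simp only [List.length_take]; omega
  · simp only [List.length_drop]; omega

def pdj_alt (ip : List Int) : List (List Int) :=
  let vals := (PySem.List.pyRange 0 9 1).map (fun i => PySem.List.pyGetD ip i 0)
  if PySem.Int.mod (pdjSortCount vals).2 2 == 0 then pdjOp1 else pdjOp2

-- ===== PRECONDITION & SPEC =====
-- Python A reads the first nine elements and raises IndexError when the list is shorter (B raises there too): those inputs are outside Pre_.
def Pre_pdj (ip : List Int) : Prop := 9 ≤ ip.length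
instance (ip : List Int) : Decidable (Pre_pdj ip) := by unfold Pre_pdj; infer_instance
def pvWitness_pdj : List Int := [1, 2, 3, 4, 5, 6, 7, 8, 0]

def Spec_pdj (ip : List Int) (out : List (List Int)) : Prop := out = pdj_alt ip
instance (ip : List Int) (out : List (List Int)) : Decidable (Spec_pdj ip out) := by unfold Spec_pdj; infer_instance

-- ===== CLAIM (what is proved, stated in full; the proofs are below) =====
def Claim_equal_pdj : Prop := ∀ (ip : List Int), Dom_pdj ip → Pre_pdj ip → Spec_pdj ip (pdj ip)

-- ===== LEMMAS AND PROOFS =====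

/-- number of inversions: pairs (earlier, later) with later < earlier -/
def pdjInv : List Int → Nat
  | [] => 0
  | x :: xs => xs.countP (fun y => decide (y < x)) + pdjInv xs

/-- cross inversions between a left block and a right block -/
def pdjCross (l r : List Int) : Nat := (l.map (fun x => r.countP (fun y => decide (y < x)))).sum

theorem pdjCross_nil_right (l : List Int) : pdjCross l [] = 0 := by
  induction l with
  | nil => rfl
  | cons x l ih => simpa [pdjCross] using ih

theorem pdjCross_cons_right (l : List Int) (y : Int) (r : List Int) :
    pdjCross l (y :: r) = pdjCross l r + l.countP (fun x => decide (y < x)) := by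
  induction l with
  | nil => rfl
  | cons x l ih =>
    simp only [pdjCross, List.map_cons, List.sum_cons, List.countP_cons] at *
    split_ifs <;> omega

theorem pdjCross_perm {l l' r r' : List Int} (hl : l.Perm l') (hr : r.Perm r') :
    pdjCross l r = pdjCross l' r' := by
  unfold pdjCross
  have h1 : ∀ x, (r.countP (fun y => decide (y < x))) = (r'.countP (fun y => decide (y < x))) :=
    fun x => hr.countP_eq _
  calc (l.map (fun x => r.countP (fun y => decide (y < x)))).sum
      = (l.map (fun x => r'.countP (fun y => decide (y < x)))).sum := by
        congr 1; exact List.map_congr_left (fun x _ => h1 x)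
    _ = (l'.map (fun x => r'.countP (fun y => decide (y < x)))).sum :=
        (hl.map _).sum_eq

theorem pdjInv_append (l r : List Int) :
    pdjInv (l ++ r) = pdjInv l + pdjCross l r + pdjInv r := by
  induction l with
  | nil => simp [pdjInv, pdjCross]
  | cons x l ih =>
    simp only [List.cons_append, pdjInv, List.countP_append, ih, pdjCross, List.map_cons,
      List.sum_cons]
    omega

theorem pdjMerge_spec : ∀ (l r : List Int), l.Pairwise (· ≤ ·) → r.Pairwise (· ≤ ·) →
    (pdjMerge l r).1.Perm (l ++ r) ∧ (pdjMerge l r).1.Pairwise (· ≤ ·) ∧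
      (pdjMerge l r).2 = (pdjCross l r : Int) := by
  intro l r hl hr
  fun_induction pdjMerge l r with
  | case1 r => simpa [pdjCross_nil_right] using hr
  | case2 x l => simpa [pdjCross] using hl
  | case3 x l y r hyx p ih =>
    obtain ⟨hperm, hsort, hcount⟩ := ih hl (List.Pairwise.sublist (List.sublist_cons_self y r) hr)
    refine ⟨?_, ?_, ?_⟩
    · exact (hperm.cons y).trans List.perm_middle.symm
    · refine List.pairwise_cons.2 ⟨?_, hsort⟩
      intro z hz
      have hz' : z ∈ (x :: l) ++ r := hperm.mem_iff.1 hz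
      rcases List.mem_append.1 hz' with hz' | hz'
      · rcases List.mem_cons.1 hz' with rfl | hz'
        · omega
        · have := (List.pairwise_cons.1 hl).1 z hz'; omega
      · exact (List.pairwise_cons.1 hr).1 z hz'
    · rw [hcount, pdjCross_cons_right]
      have hall : (x :: l).countP (fun z => decide (y < z)) = (x :: l).length := by
        rw [List.countP_eq_length]
        intro z hz
        rcases List.mem_cons.1 hz with rfl | hz'
        · simpa using hyx
        · have := (List.pairwise_cons.1 hl).1 z hz'
          simp only [decide_eq_true_eq]; omega
      simp only [List.length_cons] at hall
      push_cast [hall]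
      ring
  | case4 x l y r hyx p ih =>
    obtain ⟨hperm, hsort, hcount⟩ := ih (List.Pairwise.sublist (List.sublist_cons_self x l) hl) hr
    refine ⟨?_, ?_, ?_⟩
    · exact hperm.cons x
    · refine List.pairwise_cons.2 ⟨?_, hsort⟩
      intro z hz
      have hz' : z ∈ l ++ (y :: r) := hperm.mem_iff.1 hz
      rcases List.mem_append.1 hz' with hz' | hz'
      · exact (List.pairwise_cons.1 hl).1 z hz'
      · rcases List.mem_cons.1 hz' with rfl | hz'
        · omega
        · have := (List.pairwise_cons.1 hr).1 z hz'; omega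
    · rw [hcount]
      have hzero : (y :: r).countP (fun z => decide (z < x)) = 0 := by
        rw [List.countP_eq_zero]
        intro z hz
        rcases List.mem_cons.1 hz with rfl | hz'
        · simp only [decide_eq_true_eq]; omega
        · have := (List.pairwise_cons.1 hr).1 z hz'
          simp only [decide_eq_true_eq]; omega
      simp [pdjCross, hzero]

theorem pdjSortCount_spec : ∀ (a : List Int),
    (pdjSortCount a).1.Perm a ∧ (pdjSortCount a).1.Pairwise (· ≤ ·) ∧
      (pdjSortCount a).2 = (pdjInv a : Int) := by
  intro a
  fun_induction pdjSortCount a with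
  | case1 a h =>
    match a, h with
    | [], _ => simp [pdjInv]
    | [x], _ => simp [pdjInv]
  | case2 a h mid pl pr pm ihl ihr =>
    obtain ⟨lp, ls, lc⟩ := ihl
    obtain ⟨rp, rs, rc⟩ := ihr
    obtain ⟨mp, ms, mc⟩ := pdjMerge_spec _ _ ls rs
    simp only [pm, pr, pl, mid]
    refine ⟨mp.trans ((lp.append rp).trans (by rw [List.take_append_drop])), ms, ?_⟩
    have hinv : pdjInv a = pdjInv (a.take (a.length / 2)) +
        pdjCross (a.take (a.length / 2)) (a.drop (a.length / 2)) +
        pdjInv (a.drop (a.length / 2)) := by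
      conv_lhs => rw [← List.take_append_drop (a.length / 2) a]
      exact pdjInv_append _ _
    have hcr : pdjCross (pdjSortCount (a.take (a.length / 2))).1
        (pdjSortCount (a.drop (a.length / 2))).1
        = pdjCross (a.take (a.length / 2)) (a.drop (a.length / 2)) := pdjCross_perm lp rp
    rw [mc, hcr, lc, rc, hinv]
    push_cast
    ring

/-- A's nested index loops compute the inversion count of the mapped-out value list -/
theorem pdj_count_loop (g : Int → Int) : ∀ (n : Nat),
    (PySem.List.pyRange 0 (n : Int) 1).foldl (fun ct i =>
      (PySem.List.pyRange 0 i 1).foldl (fun ct j =>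
        if g i < g j then ct + 1 else ct) ct) 0
    = (pdjInv ((PySem.List.pyRange 0 (n : Int) 1).map g) : Int) := by
  intro n
  induction n with
  | zero => simp [PySem.List.pyRange_one_eq_nil, pdjInv]
  | succ n ih =>
    have hcast : (((n + 1 : Nat)) : Int) = (n : Int) + 1 := by push_cast; ring
    rw [hcast, PySem.List.pyRange_one_succ_right (by positivity), List.foldl_append, ih,
      List.map_append]
    have hstep := PySem.List.foldl_count_if (fun j => decide (g (n : Int) < g j))
      (PySem.List.pyRange 0 (n : Int) 1)
      ((pdjInv ((PySem.List.pyRange 0 (n : Int) 1).map g) : Int))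
    simp only [decide_eq_true_eq] at hstep
    simp only [List.foldl_cons, List.foldl_nil, hstep]
    rw [pdjInv_append]
    have hcp : (PySem.List.pyRange 0 (n : Int) 1).countP (fun j => decide (g (n : Int) < g j))
        = ((PySem.List.pyRange 0 (n : Int) 1).map g).countP
            (fun x => decide (g (n : Int) < x)) := by
      simp [List.countP_map, Function.comp_def]
    have hcr : pdjCross ((PySem.List.pyRange 0 (n : Int) 1).map g) [g (n : Int)]
        = ((PySem.List.pyRange 0 (n : Int) 1).map g).countP
            (fun x => decide (g (n : Int) < x)) := by
      rw [pdjCross_cons_right, pdjCross_nil_right]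
      omega
    simp only [List.map_cons, List.map_nil]
    rw [hcr, ← hcp]
    have : pdjInv [g (n : Int)] = 0 := by simp [pdjInv]
    rw [this]
    push_cast
    ring

theorem pdj_spec : Claim_equal_pdj := by
  unfold Claim_equal_pdj
  intro ip _ _
  unfold Spec_pdj
  have h9 : ((9 : Nat) : Int) = 9 := by norm_num
  have h1 := pdj_count_loop (fun i => PySem.List.pyGetD ip i 0) 9
  rw [h9] at h1
  have h2 := (pdjSortCount_spec
    ((PySem.List.pyRange 0 9 1).map (fun i => PySem.List.pyGetD ip i 0))).2.2
  simp only [pdj, pdj_alt, h1, h2]
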